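-- pv_equiv track=rewrite | github.com/vernon2gh/english_deliberate_practice | english_deliberate_practice.py | words_ebbinghaus
-- ===== SOURCE A (Python) =====
-- def words_ebbinghaus(chunks):
--     intervals = [1, 2, 4, 7, 15]
--     ebbinghaus_chunks = []
--     chunk_groups = [chunks[i:i + 20] for i in range(0, len(chunks), 20)]
--
--     for group in chunk_groups:
--         chunks_day = [[] for _ in range(35)]
--         for i, chunk in enumerate(group):
--             chunks_day[i].append(chunk)
--
--         for i, chunk in enumerate(group):
--             for interval in intervals:
--                 chunks_day[i + interval].append(chunk)
--
--         ebbinghaus_chunks.extend([item for sublist in chunks_day for item in sublist])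
--
--     return ebbinghaus_chunks
-- ===== SOURCE B (Python) =====
-- _INTERVALS_DESC = (15, 7, 4, 2, 1)
--
-- def _group_schedule(group):
--     n = len(group)
--     out = []
--     for d in range(35):
--         if d < n:
--             out.append(group[d])
--         for iv in _INTERVALS_DESC:
--             j = d - iv
--             if 0 <= j < n:
--                 out.append(group[j])
--     return out
--
-- def words_ebbinghaus(chunks):
--     out = []
--     for start in range(0, len(chunks), 20):
--         out += _group_schedule(chunks[start:start + 20])
--     return out
-- ===== Notes on version B (the rewrite author's own statement) =====
-- stated objective: simpler
-- what changed: B builds each 20-chunk group's 35-day schedule day-by-day (appending the day's initial chunk and then its 15/7/4/2/1-day-old reviews directly to the output), instead of scattering every chunk into 35 intermediate day-bucket lists and flattening them.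
import Mathlib
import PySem

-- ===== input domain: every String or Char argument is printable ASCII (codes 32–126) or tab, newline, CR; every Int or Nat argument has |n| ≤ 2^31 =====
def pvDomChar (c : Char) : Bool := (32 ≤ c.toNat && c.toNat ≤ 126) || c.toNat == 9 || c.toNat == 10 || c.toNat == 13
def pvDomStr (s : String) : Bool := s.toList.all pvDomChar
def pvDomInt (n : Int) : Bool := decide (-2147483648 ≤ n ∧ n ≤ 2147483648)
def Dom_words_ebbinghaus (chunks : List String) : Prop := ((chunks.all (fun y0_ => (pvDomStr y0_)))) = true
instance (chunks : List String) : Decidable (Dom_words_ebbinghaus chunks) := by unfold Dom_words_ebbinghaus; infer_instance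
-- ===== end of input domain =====

set_option maxRecDepth 4000
set_option maxHeartbeats 1000000


-- B gathers each 35-day schedule day-by-day instead of scattering chunks into 35 buckets and flattening (objective: simpler decomposition, same cost).

-- ===== PORT A =====
-- one iteration of A's 'for group in chunk_groups' body: scatter into 35 day-buckets, then flatten
def perGroupA (group : List String) : List String :=
  let intervals : List Int := [1, 2, 4, 7, 15]
  let chunksDay : List (List String) :=
    (PySem.List.enumerate group).foldl
      (fun cd p => cd.modify p.1.toNat (fun day => day ++ [p.2]))
      (List.replicate 35 [])
  let chunksDay2 : List (List String) :=
    (PySem.List.enumerate group).foldl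
      (fun cd p => intervals.foldl
        (fun cd iv => cd.modify (p.1 + iv).toNat (fun day => day ++ [p.2])) cd)
      chunksDay
  chunksDay2.flatten

def words_ebbinghaus (chunks : List String) : List String :=
  let chunkGroups : List (List String) :=
    (PySem.List.pyRange 0 chunks.length 20).map
      (fun i => PySem.List.slice chunks (some i) (some (i + 20)))
  chunkGroups.foldl (fun acc g => acc ++ perGroupA g) []

-- ===== PORT B =====
-- one group's schedule, built day-major: day d gets group[d] first, then the interval copies
def perGroupB (group : List String) : List String :=
  let n : Int := group.length
  (PySem.List.pyRange 0 35 1).foldl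
    (fun out d =>
      let out := if d < n then out ++ [group.getD d.toNat ""] else out
      ([15, 7, 4, 2, 1] : List Int).foldl
        (fun out iv =>
          let j := d - iv
          if 0 ≤ j ∧ j < n then out ++ [group.getD j.toNat ""] else out)
        out)
    []

def words_ebbinghaus_alt (chunks : List String) : List String :=
  (PySem.List.pyRange 0 chunks.length 20).foldl
    (fun out start =>
      out ++ perGroupB (PySem.List.slice chunks (some start) (some (start + 20))))
    []

-- ===== PRECONDITION & SPEC =====
def Spec_words_ebbinghaus (chunks : List String) (out : List String) : Prop := out = words_ebbinghaus_alt chunks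
instance (chunks : List String) (out : List String) : Decidable (Spec_words_ebbinghaus chunks out) := by unfold Spec_words_ebbinghaus; infer_instance

-- ===== CLAIM (what is proved, stated in full; the proofs are below) =====
def Claim_equal_words_ebbinghaus : Prop := ∀ (chunks : List String), Dom_words_ebbinghaus chunks → Spec_words_ebbinghaus chunks (words_ebbinghaus chunks)

-- ===== LEMMAS AND PROOFS =====

-- token lists: tok i is a string of i copies of 'a'; fdec g decodes a token back to g's element
def tok (i : Nat) : String := String.ofList (List.replicate i 'a')
def toks (n : Nat) : List String := (List.range n).map tok
def fdec (g : List String) : String → String := fun s => g.getD s.toList.length ""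

theorem getD_map_lt (f : String → String) (g : List String) (k : Nat) (hk : k < g.length) :
    (g.map f).getD k "" = f (g.getD k "") := by
  simp [List.getD_eq_getElem?_getD, List.getElem?_eq_getElem hk,
    List.getElem?_eq_getElem (show k < (g.map f).length by simpa using hk)]

theorem toks_map_fdec (g : List String) : (toks g.length).map (fdec g) = g := by
  unfold toks fdec tok
  rw [List.map_map]
  apply List.ext_getElem
  · simp
  · intro i h1 h2
    simp [List.getD_eq_getElem?_getD, List.getElem?_eq_getElem h2]

-- naturality of perGroupA
theorem enumerate_map {α β : Type} (f : α → β) (g : List α) (s : Int) :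
    PySem.List.enumerate (g.map f) s = (PySem.List.enumerate g s).map (fun p => (p.1, f p.2)) := by
  induction g generalizing s with
  | nil => rfl
  | cons x xs ih => simp [PySem.List.enumerate_cons, ih]

theorem modify_map (f : String → String) (cd : List (List String)) (k : Nat) (c : String) :
    (cd.map (List.map f)).modify k (fun day => day ++ [f c]) =
    (cd.modify k (fun day => day ++ [c])).map (List.map f) := by
  induction cd generalizing k with
  | nil => simp [List.modify_nil]
  | cons x xs ih =>
      cases k with
      | zero => simp [List.modify_zero_cons]
      | succ k => simp [List.modify_succ_cons, ih]

theorem foldl1_modify_map (f : String → String) (ops : List (Int × String)) (cd : List (List String)) :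
    (ops.map (fun p => (p.1, f p.2))).foldl
        (fun cd p => cd.modify p.1.toNat (fun day => day ++ [p.2])) (cd.map (List.map f))
    = (ops.foldl (fun cd p => cd.modify p.1.toNat (fun day => day ++ [p.2])) cd).map (List.map f) := by
  induction ops generalizing cd with
  | nil => rfl
  | cons p ps ih => simp only [List.map_cons, List.foldl_cons, modify_map, ih]

theorem inner2_map (f : String → String) (ivs : List Int) (i : Int) (c : String)
    (cd : List (List String)) :
    ivs.foldl (fun cd iv => cd.modify (i + iv).toNat (fun day => day ++ [f c]))
      (cd.map (List.map f))
    = (ivs.foldl (fun cd iv => cd.modify (i + iv).toNat (fun day => day ++ [c])) cd).map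
        (List.map f) := by
  induction ivs generalizing cd with
  | nil => rfl
  | cons iv ivs ih =>
      simp only [List.foldl_cons]
      rw [modify_map, ih]

theorem foldl2_modify_map (f : String → String) (ops : List (Int × String)) (cd : List (List String)) :
    (ops.map (fun p => (p.1, f p.2))).foldl
        (fun cd p => ([1, 2, 4, 7, 15] : List Int).foldl
          (fun cd iv => cd.modify (p.1 + iv).toNat (fun day => day ++ [p.2])) cd)
        (cd.map (List.map f))
    = (ops.foldl (fun cd p => ([1, 2, 4, 7, 15] : List Int).foldl
          (fun cd iv => cd.modify (p.1 + iv).toNat (fun day => day ++ [p.2])) cd) cd).map (List.map f) := by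
  induction ops generalizing cd with
  | nil => rfl
  | cons p ps ih =>
      rw [List.map_cons]
      conv_lhs => rw [List.foldl_cons]
      conv_rhs => rw [List.foldl_cons]
      dsimp only
      rw [inner2_map]
      exact ih _

theorem perGroupA_map (f : String → String) (g : List String) :
    perGroupA (g.map f) = (perGroupA g).map f := by
  unfold perGroupA
  dsimp only
  rw [enumerate_map]
  have hinit : (List.replicate 35 ([] : List String)) =
      (List.replicate 35 ([] : List String)).map (List.map f) := by simp
  rw [hinit, foldl1_modify_map, foldl2_modify_map]
  simp

theorem innerB_map (f : String → String) (g : List String) (ivs : List Int) (d : Int)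
    (out : List String) :
    ivs.foldl (fun out iv =>
        if 0 ≤ d - iv ∧ d - iv < (g.length : Int) then out ++ [(g.map f).getD (d - iv).toNat ""]
        else out)
      (out.map f)
    = (ivs.foldl (fun out iv =>
        if 0 ≤ d - iv ∧ d - iv < (g.length : Int) then out ++ [g.getD (d - iv).toNat ""]
        else out) out).map f := by
  induction ivs generalizing out with
  | nil => rfl
  | cons iv ivs ih =>
      simp only [List.foldl_cons]
      by_cases h : 0 ≤ d - iv ∧ d - iv < (g.length : Int)
      · rw [if_pos h, if_pos h,
          show [(g.map f).getD (d - iv).toNat ""] = List.map f [g.getD (d - iv).toNat ""] from by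
            rw [List.map_singleton, getD_map_lt f g _ (by omega)],
          ← List.map_append, ih]
      · rw [if_neg h, if_neg h, ih]

theorem outerB_map (f : String → String) (g : List String) (D : List Int)
    (hD : ∀ d ∈ D, 0 ≤ d) (out : List String) :
    D.foldl (fun out d =>
        ([15, 7, 4, 2, 1] : List Int).foldl (fun out iv =>
          if 0 ≤ d - iv ∧ d - iv < (g.length : Int) then out ++ [(g.map f).getD (d - iv).toNat ""]
          else out)
          (if d < (g.length : Int) then out ++ [(g.map f).getD d.toNat ""] else out))
      (out.map f)
    = (D.foldl (fun out d =>
        ([15, 7, 4, 2, 1] : List Int).foldl (fun out iv =>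
          if 0 ≤ d - iv ∧ d - iv < (g.length : Int) then out ++ [g.getD (d - iv).toNat ""]
          else out)
          (if d < (g.length : Int) then out ++ [g.getD d.toNat ""] else out)) out).map f := by
  induction D generalizing out with
  | nil => rfl
  | cons d D ih =>
      have hd : 0 ≤ d := hD d (by simp)
      have htail : ∀ x ∈ D, (0:Int) ≤ x := fun x hx => hD x (by simp [hx])
      have hinit : (if d < (g.length : Int) then out.map f ++ [(g.map f).getD d.toNat ""]
            else out.map f)
          = (if d < (g.length : Int) then out ++ [g.getD d.toNat ""] else out).map f := by
        by_cases h : d < (g.length : Int)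
        · rw [if_pos h, if_pos h, List.map_append, List.map_singleton,
            getD_map_lt f g _ (by omega)]
        · rw [if_neg h, if_neg h]
      conv_lhs => rw [List.foldl_cons]
      conv_rhs => rw [List.foldl_cons]
      rw [hinit, innerB_map]
      exact ih htail _

theorem perGroupB_map (f : String → String) (g : List String) :
    perGroupB (g.map f) = (perGroupB g).map f := by
  unfold perGroupB
  dsimp only
  simp only [List.length_map]
  have := outerB_map f g (PySem.List.pyRange 0 35 1)
    (fun d hd => ((PySem.List.mem_pyRange_one.1 hd).1)) []
  simpa using this

theorem perGroup_tok : ∀ n : Fin 21, perGroupA (toks n.val) = perGroupB (toks n.val) := by decide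

-- the two per-group schedules agree on every group of at most 20 chunks
theorem perGroup_eq (g : List String) (h : g.length ≤ 20) : perGroupA g = perGroupB g := by
  have hg := toks_map_fdec g
  calc perGroupA g = perGroupA ((toks g.length).map (fdec g)) := by rw [hg]
    _ = (perGroupA (toks g.length)).map (fdec g) := perGroupA_map _ _
    _ = (perGroupB (toks g.length)).map (fdec g) := by rw [perGroup_tok ⟨g.length, by omega⟩]
    _ = perGroupB ((toks g.length).map (fdec g)) := (perGroupB_map _ _).symm
    _ = perGroupB g := by rw [hg]

theorem slice_len_le (chunks : List String) (i : Int) (hi : 0 ≤ i) :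
    (PySem.List.slice chunks (some i) (some (i + 20))).length ≤ 20 := by
  rw [PySem.List.slice_toNat chunks hi (by omega)]
  have : (i + 20).toNat - i.toNat = 20 := by omega
  rw [this]
  simp [List.length_take]

-- ===== VERDICT (by name: the statement is the Claim_ definition above) =====
theorem words_ebbinghaus_spec : Claim_equal_words_ebbinghaus := by
  intro chunks _
  unfold Spec_words_ebbinghaus words_ebbinghaus words_ebbinghaus_alt
  rw [PySem.List.foldl_append_eq_flatMap, PySem.List.foldl_append_eq_flatMap,
    List.flatMap_map]
  simp only [List.nil_append]
  refine List.flatMap_congr (fun i hi => ?_)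
  have h0 : (0 : Int) ≤ i :=
    ((PySem.List.mem_pyRange_iff_of_pos (show (0:Int) < 20 by norm_num) i).1 hi).1
  exact perGroup_eq _ (slice_len_le chunks i h0)
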